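-- pv_equiv track=rewrite | github.com/infung/handbag_crawler | handbag_data_util.py | get_entry_with_max_count
-- ===== SOURCE A (Python) =====
-- def get_entry_with_max_count(category_list, count_dict):
--     max_count = 0
--     max_entry = None
--     for entry in category_list:
--         if entry in count_dict and count_dict[entry] > max_count:
--             max_count = count_dict[entry]
--             max_entry = entry
--     return max_entry
-- ===== SOURCE B (Python) =====
-- def get_entry_with_max_count(category_list, count_dict):
--     ranked = sorted(
--         ((i, e) for i, e in enumerate(category_list) if count_dict.get(e, 0) > 0),
--         key=lambda p: (-count_dict[p[1]], p[0]))
--     return ranked[0][1] if ranked else None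
-- ===== Notes on version B (the rewrite author's own statement) =====
-- stated objective: alternative
-- what changed: Replaces A's single running-max loop (max_count/max_entry accumulators) by a sort-then-pick-head algorithm: B pairs each entry with its position, keeps the positive-count ones, sorts them by the key (-count, position), and returns the entry of the first ranked pair (no running maximum is maintained).
import Mathlib
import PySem

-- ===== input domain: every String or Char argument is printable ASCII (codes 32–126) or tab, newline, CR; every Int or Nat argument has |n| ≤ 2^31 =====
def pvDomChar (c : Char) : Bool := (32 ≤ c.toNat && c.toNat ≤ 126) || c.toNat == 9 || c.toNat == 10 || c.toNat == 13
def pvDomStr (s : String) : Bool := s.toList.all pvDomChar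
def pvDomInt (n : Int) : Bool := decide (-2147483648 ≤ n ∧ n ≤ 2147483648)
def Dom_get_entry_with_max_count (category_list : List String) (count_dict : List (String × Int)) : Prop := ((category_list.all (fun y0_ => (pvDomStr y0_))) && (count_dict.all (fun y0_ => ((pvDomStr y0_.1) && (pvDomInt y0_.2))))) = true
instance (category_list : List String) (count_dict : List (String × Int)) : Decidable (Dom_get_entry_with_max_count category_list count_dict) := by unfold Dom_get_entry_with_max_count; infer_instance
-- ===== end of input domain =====

-- B replaces A's running-max loop by a sort: it ranks the positive-count entries (kept with their
-- positions) by the key (-count, position) and returns the head of the ranking; same result, O(n log n).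

-- ===== PORT A =====
-- dict membership + indexing: first match in the association list (keys are unique in a Python dict)
def pvLookup (count_dict : List (String × Int)) (entry : String) : Option Int :=
  List.lookup entry count_dict

def get_entry_with_max_count (category_list : List String) (count_dict : List (String × Int)) : Option String :=
  (category_list.foldl
    (fun (st : Int × Option String) entry =>
      match pvLookup count_dict entry with
      | some v => if st.1 < v then (v, some entry) else st
      | none => st)
    (0, none)).2

-- ===== PORT B =====
-- count_dict.get(e, 0)
def pvKey (count_dict : List (String × Int)) (entry : String) : Int :=
  (pvLookup count_dict entry).getD 0

def get_entry_with_max_count_alt (category_list : List String) (count_dict : List (String × Int)) : Option String :=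
  let ranked := PySem.List.sorted
    ((PySem.List.enumerate category_list 0).filter (fun p => decide (0 < pvKey count_dict p.2)))
    (fun p => toLex (-(pvKey count_dict p.2), p.1))
  match ranked with
  | [] => none
  | p :: _ => some p.2

-- ===== PRECONDITION & SPEC =====
def Spec_get_entry_with_max_count (category_list : List String) (count_dict : List (String × Int)) (out : Option String) : Prop := out = get_entry_with_max_count_alt category_list count_dict
instance (category_list : List String) (count_dict : List (String × Int)) (out : Option String) : Decidable (Spec_get_entry_with_max_count category_list count_dict out) := by unfold Spec_get_entry_with_max_count; infer_instance

-- ===== CLAIM (what is proved, stated in full; the proofs are below) =====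
def Claim_equal_get_entry_with_max_count : Prop := ∀ (category_list : List String) (count_dict : List (String × Int)), Dom_get_entry_with_max_count category_list count_dict → Spec_get_entry_with_max_count category_list count_dict (get_entry_with_max_count category_list count_dict)

-- ===== LEMMAS AND PROOFS =====

-- the sort key B uses
def pvK (d : List (String × Int)) (p : Int × String) : Lex (Int × Int) :=
  toLex (-(pvKey d p.2), p.1)

-- A's loop, from any state satisfying the loop invariant, equals a first-wins running max
-- (over strings) on the positive-count entries.
theorem loop_eq (count_dict : List (String × Int)) (cl : List String) :
    ∀ (mc : Int) (me : Option String),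
      ((me = none ∧ mc = 0) ∨ (∃ m, me = some m ∧ mc = pvKey count_dict m ∧ 0 < mc)) →
      (cl.foldl
        (fun (st : Int × Option String) entry =>
          match pvLookup count_dict entry with
          | some v => if st.1 < v then (v, some entry) else st
          | none => st)
        (mc, me)).2 =
      (cl.filter (fun e => decide (0 < pvKey count_dict e))).foldl
        (fun acc x =>
          match acc with
          | none => some x
          | some m => if pvKey count_dict m < pvKey count_dict x then some x else some m)
        me := by
  induction cl with
  | nil =>
      intro mc me _; rfl
  | cons e t ih =>
      intro mc me hinv
      by_cases hk : 0 < pvKey count_dict e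
      · have hsome : pvLookup count_dict e = some (pvKey count_dict e) := by
          unfold pvKey at hk ⊢
          cases h : pvLookup count_dict e with
          | none => simp [h] at hk
          | some v => rfl
        simp only [List.foldl_cons, List.filter_cons, hk, decide_true, if_true, hsome]
        rcases hinv with ⟨hme, hmc⟩ | ⟨m, hme, hmc, hpos⟩
        · subst hme; subst hmc
          simp only [hk, if_true]
          exact ih _ _ (Or.inr ⟨e, rfl, rfl, hk⟩)
        · subst hme; subst hmc
          by_cases hlt : pvKey count_dict m < pvKey count_dict e
          · simp only [hlt, if_true]
            exact ih _ _ (Or.inr ⟨e, rfl, rfl, hk⟩)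
          · simp only [hlt, if_false]
            exact ih _ _ (Or.inr ⟨m, rfl, rfl, hpos⟩)
      · have hstep :
            (match pvLookup count_dict e with
              | some v => if mc < v then (v, some e) else (mc, me)
              | none => (mc, me)) = (mc, me) := by
          have hmc0 : 0 ≤ mc := by
            rcases hinv with ⟨_, hmc⟩ | ⟨m, _, _, hpos⟩
            · omega
            · omega
          cases h : pvLookup count_dict e with
          | none => rfl
          | some v =>
              have hv : v = pvKey count_dict e := by unfold pvKey; simp [h]
              have : ¬ mc < v := by rw [hv]; omega
              simp [this]
        simp only [List.foldl_cons, List.filter_cons, hk, decide_false, hstep]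
        exact ih _ _ hinv

-- the string-level fold is the pair-level fold followed by projection
theorem fold_snd (d : List (String × Int)) :
    ∀ (c : List (Int × String)) (acc : Option (Int × String)),
      (c.map (·.2)).foldl
        (fun acc x =>
          match acc with
          | none => some x
          | some m => if pvKey d m < pvKey d x then some x else some m)
        (acc.map (·.2)) =
      (c.foldl
        (fun acc p =>
          match acc with
          | none => some p
          | some m => if pvKey d m.2 < pvKey d p.2 then some p else some m)
        acc).map (·.2) := by
  intro c
  induction c with
  | nil => intro acc; rfl
  | cons p t ih =>
      intro acc
      cases acc with
      | none => simpa using ih (some p)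
      | some m =>
          by_cases h : pvKey d m.2 < pvKey d p.2
          · simpa [h] using ih (some p)
          · simpa [h] using ih (some m)

-- a pair-level fold from a seed is a total fold
theorem fold_some (d : List (String × Int)) :
    ∀ (t : List (Int × String)) (m : Int × String),
      t.foldl
        (fun acc q =>
          match acc with
          | none => some q
          | some m => if pvKey d m.2 < pvKey d q.2 then some q else some m)
        (some m) =
      some (t.foldl (fun acc q => if pvKey d acc.2 < pvKey d q.2 then q else acc) m) := by
  intro t
  induction t with
  | nil => intro m; rfl
  | cons p t ih =>
      intro m
      by_cases h : pvKey d m.2 < pvKey d p.2 <;> simp [h, ih]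

-- one fold step from an empty accumulator seeds the running max
theorem fold_none (d : List (String × Int)) (p : Int × String) (t : List (Int × String)) :
    (p :: t).foldl
      (fun acc q =>
        match acc with
        | none => some q
        | some m => if pvKey d m.2 < pvKey d q.2 then some q else some m)
      none =
    some (t.foldl (fun acc q => if pvKey d acc.2 < pvKey d q.2 then q else acc) p) := by
  have h : (p :: t).foldl
      (fun acc q =>
        match acc with
        | none => some q
        | some m => if pvKey d m.2 < pvKey d q.2 then some q else some m)
      none =
      t.foldl
        (fun acc q =>
          match acc with
          | none => some q
          | some m => if pvKey d m.2 < pvKey d q.2 then some q else some m)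
        (some p) := rfl
  rw [h, fold_some]

-- the running max minimises the key (-count, position) over everything it has seen
theorem foldmax_min (d : List (String × Int)) :
    ∀ (t : List (Int × String)) (m : Int × String),
      (∀ y ∈ t, m.1 < y.1) → t.Pairwise (fun a b => a.1 < b.1) →
      (t.foldl (fun acc q => if pvKey d acc.2 < pvKey d q.2 then q else acc) m) ∈ m :: t ∧
      ∀ y ∈ m :: t,
        pvK d (t.foldl (fun acc q => if pvKey d acc.2 < pvKey d q.2 then q else acc) m) ≤ pvK d y := by
  intro t
  induction t with
  | nil =>
      intro m _ _
      refine ⟨List.mem_cons_self, ?_⟩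
      intro y hy
      rcases List.mem_cons.mp hy with rfl | hy
      · exact le_refl _
      · cases hy
  | cons p t ih =>
      intro m hlt hpw
      have hpt : ∀ y ∈ t, p.1 < y.1 := fun y hy => (List.pairwise_cons.mp hpw).1 y hy
      have hpw' : t.Pairwise (fun a b : Int × String => a.1 < b.1) := (List.pairwise_cons.mp hpw).2
      have hmp : m.1 < p.1 := hlt p List.mem_cons_self
      by_cases h : pvKey d m.2 < pvKey d p.2
      · obtain ⟨hmem, hmin⟩ := ih p hpt hpw'
        simp only [List.foldl_cons, h, if_true]
        have hpm : pvK d p ≤ pvK d m := by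
          unfold pvK
          rw [Prod.Lex.toLex_le_toLex]
          left; dsimp only; omega
        refine ⟨?_, ?_⟩
        · rcases List.mem_cons.mp hmem with h1 | h1
          · exact List.mem_cons.mpr (Or.inr (by rw [h1]; exact List.mem_cons_self))
          · exact List.mem_cons.mpr (Or.inr (List.mem_cons.mpr (Or.inr h1)))
        · intro y hy
          rcases List.mem_cons.mp hy with rfl | hy
          · exact le_trans (le_trans (hmin p List.mem_cons_self) hpm) (le_refl _)
          · exact hmin y hy
      · have hmt : ∀ y ∈ t, m.1 < y.1 := fun y hy => lt_trans hmp (hpt y hy)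
        obtain ⟨hmem, hmin⟩ := ih m hmt hpw'
        simp only [List.foldl_cons, h, if_false]
        have hmple : pvK d m ≤ pvK d p := by
          unfold pvK
          rw [Prod.Lex.toLex_le_toLex]
          dsimp only
          omega
        refine ⟨?_, ?_⟩
        · rcases List.mem_cons.mp hmem with h1 | h1
          · exact List.mem_cons.mpr (Or.inl h1)
          · exact List.mem_cons.mpr (Or.inr (List.mem_cons.mpr (Or.inr h1)))
        · intro y hy
          rcases List.mem_cons.mp hy with rfl | hy
          · exact hmin y List.mem_cons_self
          · rcases List.mem_cons.mp hy with rfl | hy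
            · exact le_trans (hmin m List.mem_cons_self) hmple
            · exact hmin y (List.mem_cons.mpr (Or.inr hy))

-- two members of a .1-strictly-increasing list with equal .1 are the same element
theorem eq_of_fst_eq {t : List (Int × String)} (hpw : t.Pairwise (fun a b => a.1 < b.1))
    {a b : Int × String} (ha : a ∈ t) (hb : b ∈ t) (h : a.1 = b.1) : a = b := by
  induction t with
  | nil => cases ha
  | cons p t ih =>
      have hpt := (List.pairwise_cons.mp hpw).1
      have hpw' := (List.pairwise_cons.mp hpw).2
      rcases List.mem_cons.mp ha with h1 | h1 <;> rcases List.mem_cons.mp hb with h2 | h2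
      · rw [h1, h2]
      · subst h1; exact absurd (h ▸ hpt b h2) (lt_irrefl _)
      · subst h2; exact absurd (h ▸ hpt a h1) (lt_irrefl _)
      · exact ih hpw' h1 h2

-- first-wins running max over the pairs = head of B's ranking, for any .1-strictly-increasing list
theorem main_aux (d : List (String × Int)) (c : List (Int × String))
    (hpw : c.Pairwise (fun a b => a.1 < b.1)) :
    (c.map (·.2)).foldl
      (fun acc x =>
        match acc with
        | none => some x
        | some m => if pvKey d m < pvKey d x then some x else some m)
      none =
    (match PySem.List.sorted c (fun p => toLex (-(pvKey d p.2), p.1)) with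
     | [] => none
     | r :: _ => some r.2) := by
  have hfold := fold_snd d c none
  simp only [Option.map_none] at hfold
  rw [hfold]
  cases hc : c with
  | nil => rfl
  | cons p t =>
      subst hc
      have hsne : PySem.List.sorted (p :: t) (fun q => toLex (-(pvKey d q.2), q.1)) ≠ [] := by
        intro hnil
        have := (PySem.List.sorted_eq_nil_iff (p :: t) (fun q => toLex (-(pvKey d q.2), q.1)) false).mp hnil
        exact List.cons_ne_nil p t this
      cases hs : PySem.List.sorted (p :: t) (fun q => toLex (-(pvKey d q.2), q.1)) with
      | nil => exact absurd hs hsne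
      | cons r rest =>
          rw [fold_none d p t]
          obtain ⟨hmem, hmin⟩ := foldmax_min d t p
            (fun y hy => (List.pairwise_cons.mp hpw).1 y hy) (List.pairwise_cons.mp hpw).2
          have hrmem : r ∈ p :: t := by
            have hperm := PySem.List.sorted_perm (p :: t) (fun q => toLex (-(pvKey d q.2), q.1)) false
            rw [hs] at hperm
            exact hperm.mem_iff.mp List.mem_cons_self
          have hrmin : ∀ y ∈ p :: t,
              pvK d r ≤ pvK d y := by
            intro y hy
            exact PySem.List.key_head_sorted_le (p :: t) (fun q => toLex (-(pvKey d q.2), q.1)) hs y hy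
          have h1 := hmin r hrmem
          have h2 := hrmin _ hmem
          have hkeq : pvK d (t.foldl (fun acc q => if pvKey d acc.2 < pvKey d q.2 then q else acc) p)
              = pvK d r := le_antisymm h1 h2
          have hfst : (t.foldl (fun acc q => if pvKey d acc.2 < pvKey d q.2 then q else acc) p).1 = r.1 := by
            unfold pvK at hkeq
            have := congrArg (fun z => (ofLex z).2) hkeq
            simpa using this
          have heq := eq_of_fst_eq hpw hmem hrmem hfst
          simp [heq]

-- ===== VERDICT (by name: the statement is the Claim_ definition above) =====
theorem get_entry_with_max_count_spec : Claim_equal_get_entry_with_max_count := by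
  intro cl d _
  unfold Spec_get_entry_with_max_count get_entry_with_max_count get_entry_with_max_count_alt
  have h := loop_eq d cl 0 none (Or.inl ⟨rfl, rfl⟩)
  rw [h]
  have hfs : cl.filter (fun e => decide (0 < pvKey d e)) =
      ((PySem.List.enumerate cl 0).filter (fun p => decide (0 < pvKey d p.2))).map (·.2) := by
    conv_lhs => rw [← PySem.List.map_snd_enumerate cl 0]
    rw [List.filter_map]
    rfl
  rw [hfs]
  have hpw : ((PySem.List.enumerate cl 0).filter (fun p => decide (0 < pvKey d p.2))).Pairwise
      (fun a b => a.1 < b.1) :=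
    List.Pairwise.filter _ (PySem.List.pairwise_lt_enumerate cl 0)
  exact main_aux d _ hpw
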